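-- pv_equiv track=rewrite | github.com/faberquisque/Introduction-to-python | resuelve_scrabble.py | replaceSpecial
-- ===== SOURCE A (Python) =====
-- RR = '0'
--
-- CH = '1'
--
-- LL = '2'
--
-- def replaceSpecial(word, reverse=False):
--     mapa = [('rr',RR),('ch',CH),('ll',LL)]
--     old = int(reverse)
--     new = int(not reverse)
--     for pair in mapa:
--         if pair[old] in word:
--             word = word.replace(pair[old],pair[new])
--     return word
-- ===== SOURCE B (Python) =====
-- def replaceSpecial(word, reverse=False):
--     if reverse:
--         table = {'0': 'rr', '1': 'ch', '2': 'll'}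
--         return ''.join(table.get(c, c) for c in word)
--     table = {'rr': '0', 'ch': '1', 'll': '2'}
--     out = []
--     i = 0
--     n = len(word)
--     while i < n:
--         two = word[i:i + 2]
--         if two in table:
--             out.append(table[two])
--             i += 2
--         else:
--             out.append(word[i])
--             i += 1
--     return ''.join(out)
-- ===== Notes on version B (the rewrite author's own statement) =====
-- stated objective: alternative
-- what changed: Replaced A's three sequential full-string .replace passes (plus membership pre-checks) by a single left-to-right scan that looks each two-character window (or, in reverse mode, each character) up in a token table and emits the translation once.
import Mathlib
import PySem

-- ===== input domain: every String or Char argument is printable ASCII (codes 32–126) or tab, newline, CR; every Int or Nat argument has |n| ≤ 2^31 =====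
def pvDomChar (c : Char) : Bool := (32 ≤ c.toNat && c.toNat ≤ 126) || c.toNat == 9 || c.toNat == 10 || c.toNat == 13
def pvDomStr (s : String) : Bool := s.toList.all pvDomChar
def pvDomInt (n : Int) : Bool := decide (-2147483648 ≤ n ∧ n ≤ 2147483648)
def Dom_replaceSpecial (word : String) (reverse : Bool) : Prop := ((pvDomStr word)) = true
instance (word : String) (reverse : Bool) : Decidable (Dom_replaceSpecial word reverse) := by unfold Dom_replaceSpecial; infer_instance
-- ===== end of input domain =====

-- B replaces the three sequential full-string .replace passes by a single left-to-right
-- scan with a token table (objective: alternative single-pass algorithm, same cost class).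

-- ===== PORT A =====
-- literal port of A: a fold over mapa; pair[old]/pair[new] select by the reverse flag
def replaceSpecial (word : String) (reverse : Bool) : String :=
  let mapa : List (String × String) := [("rr", "0"), ("ch", "1"), ("ll", "2")]
  List.foldl (fun w pair =>
      let old := if reverse then pair.2 else pair.1   -- pair[int(reverse)]
      let nw  := if reverse then pair.1 else pair.2   -- pair[int(not reverse)]
      if PySem.Str.isIn old w then PySem.Str.replace w old nw else w)
    word mapa

-- ===== PORT B =====
-- port of Source B's forward while-loop: look at word[i:i+2], emit the code or copy one char
def pvAltFwd : List Char → List Char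
  | [] => []
  | [a] => [a]
  | a :: b :: t =>
    if a = 'r' ∧ b = 'r' then '0' :: pvAltFwd t
    else if a = 'c' ∧ b = 'h' then '1' :: pvAltFwd t
    else if a = 'l' ∧ b = 'l' then '2' :: pvAltFwd t
    else a :: pvAltFwd (b :: t)

-- port of Source B's reverse pass: table.get(c, c) per character, joined
def pvAltRevMap (c : Char) : List Char :=
  if c = '0' then ['r', 'r'] else if c = '1' then ['c', 'h']
  else if c = '2' then ['l', 'l'] else [c]

def pvAltRev : List Char → List Char
  | [] => []
  | c :: t => pvAltRevMap c ++ pvAltRev t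

def replaceSpecial_alt (word : String) (reverse : Bool) : String :=
  if reverse then String.ofList (pvAltRev word.toList)
  else String.ofList (pvAltFwd word.toList)

-- ===== PRECONDITION & SPEC =====
def Spec_replaceSpecial (word : String) (reverse : Bool) (out : String) : Prop := out = replaceSpecial_alt word reverse
instance (word : String) (reverse : Bool) (out : String) : Decidable (Spec_replaceSpecial word reverse out) := by unfold Spec_replaceSpecial; infer_instance

-- ===== CLAIM (what is proved, stated in full; the proofs are below) =====
def Claim_equal_replaceSpecial : Prop := ∀ (word : String) (reverse : Bool), Dom_replaceSpecial word reverse → Spec_replaceSpecial word reverse (replaceSpecial word reverse)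

-- ===== LEMMAS AND PROOFS =====

-- structural characterisation of Python's leftmost non-overlapping replace (old ≠ [])
def pvRep (old nw : List Char) : List Char → List Char
  | [] => []
  | c :: t =>
    if old.isPrefixOf (c :: t) then nw ++ pvRep old nw (t.drop (old.length - 1))
    else c :: pvRep old nw t
termination_by l => l.length
decreasing_by
  · simp only [List.length_drop, List.length_cons]; omega
  · simp

theorem pvGo_eq (old nw : List Char) (h : old ≠ []) :
    ∀ fuel l acc, l.length ≤ fuel →
      PySem.Chars.replace.go old nw fuel l acc = acc.reverse ++ pvRep old nw l := by
  intro fuel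
  induction fuel with
  | zero =>
    intro l acc hl
    have : l = [] := List.eq_nil_of_length_eq_zero (Nat.le_zero.mp hl)
    subst this
    simp [PySem.Chars.replace.go, pvRep]
  | succ n ih =>
    intro l acc hl
    cases l with
    | nil => simp [PySem.Chars.replace.go, pvRep]
    | cons c t =>
      rw [PySem.Chars.replace.go]
      by_cases hp : old.isPrefixOf (c :: t)
      · obtain ⟨k, hk⟩ : ∃ k, old.length = k + 1 := by
          cases old with
          | nil => exact absurd rfl h
          | cons x xs => exact ⟨xs.length, by simp⟩
        have hdrop : (c :: t).drop old.length = t.drop k := by rw [hk]; simp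
        simp only [hp, if_true]
        rw [hdrop]
        rw [ih (t.drop k) (nw.reverse ++ acc) (by
          simp only [List.length_drop]
          simp at hl
          omega)]
        simp [pvRep, hp, hk]
      · simp only [hp, Bool.false_eq_true, if_false]
        rw [ih t (c :: acc) (by simp at hl; omega)]
        simp [pvRep, hp]

theorem pvReplace_eq (old nw s : List Char) (h : old ≠ []) :
    PySem.Chars.replace s old nw = pvRep old nw s := by
  rw [PySem.Chars.replace]
  have he : old.isEmpty = false := by
    cases old with
    | nil => exact absurd rfl h
    | cons x xs => rfl
  simp only [he, Bool.false_eq_true, if_false]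
  rw [pvGo_eq old nw h s.length s [] (le_refl _)]
  simp

theorem pvRep_of_not_infix (old nw s : List Char) (h : ¬ old <:+: s) :
    pvRep old nw s = s := by
  induction s with
  | nil => simp [pvRep]
  | cons c t ih =>
    rw [pvRep]
    have hp : ¬ old.isPrefixOf (c :: t) := by
      intro hpre
      exact h ((List.isPrefixOf_iff_prefix.mp hpre).isInfix)
    simp only [hp, Bool.false_eq_true, if_false]
    rw [ih (fun hi => h (hi.trans (List.suffix_cons c t).isInfix))]

theorem pvStep (w old nw : String) (h : old.toList ≠ []) :
    (if PySem.Str.isIn old w then PySem.Str.replace w old nw else w).toList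
      = pvRep old.toList nw.toList w.toList := by
  by_cases hi : PySem.Str.isIn old w
  · simp only [hi, if_true, PySem.Str.replace]
    rw [String.toList_ofList, pvReplace_eq _ _ _ h]
  · simp only [hi, Bool.false_eq_true, if_false]
    have : ¬ old.toList <:+: w.toList := by
      have := PySem.Chars.isIn_eq_false_iff (sub := old.toList) (s := w.toList)
      apply this.mp
      simpa [PySem.Str.isIn] using hi
    rw [pvRep_of_not_infix _ _ _ this]

-- head shape of a replaced nonempty list
theorem pvRep_rr_cons (b : Char) (t : List Char) :
    ∃ d u, pvRep ['r', 'r'] ['0'] (b :: t) = d :: u ∧ (d = '0' ∨ d = b) := by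
  by_cases hp : (['r', 'r'] : List Char).isPrefixOf (b :: t)
  · exact ⟨'0', pvRep ['r', 'r'] ['0'] t.tail, by rw [pvRep]; simp [hp], Or.inl rfl⟩
  · exact ⟨b, pvRep ['r', 'r'] ['0'] t, by rw [pvRep]; simp [hp], Or.inr rfl⟩

theorem pvRep_ch_cons (b : Char) (t : List Char) :
    ∃ d u, pvRep ['c', 'h'] ['1'] (b :: t) = d :: u ∧ (d = '1' ∨ d = b) := by
  by_cases hp : (['c', 'h'] : List Char).isPrefixOf (b :: t)
  · exact ⟨'1', pvRep ['c', 'h'] ['1'] t.tail, by rw [pvRep]; simp [hp], Or.inl rfl⟩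
  · exact ⟨b, pvRep ['c', 'h'] ['1'] t, by rw [pvRep]; simp [hp], Or.inr rfl⟩

theorem pvFwd_eq (l : List Char) :
    pvRep ['l', 'l'] ['2'] (pvRep ['c', 'h'] ['1'] (pvRep ['r', 'r'] ['0'] l)) = pvAltFwd l := by
  induction l using pvAltFwd.induct with
  | case1 => simp [pvRep, pvAltFwd]
  | case2 a => simp [pvRep, pvAltFwd, List.isPrefixOf]
  | case3 a b t hrr ih =>
    obtain ⟨rfl, rfl⟩ := hrr
    rw [pvAltFwd]
    rw [show pvRep ['r','r'] ['0'] ('r' :: 'r' :: t) = '0' :: pvRep ['r','r'] ['0'] t by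
      rw [pvRep]; simp [List.isPrefixOf]]
    rw [show ∀ X, pvRep ['c','h'] ['1'] ('0' :: X) = '0' :: pvRep ['c','h'] ['1'] X by
      intro X; rw [pvRep]; simp [List.isPrefixOf]]
    rw [show ∀ X, pvRep ['l','l'] ['2'] ('0' :: X) = '0' :: pvRep ['l','l'] ['2'] X by
      intro X; rw [pvRep]; simp [List.isPrefixOf]]
    rw [ih]; simp
  | case4 a b t hrr hch ih =>
    obtain ⟨rfl, rfl⟩ := hch
    rw [pvAltFwd]
    simp only [if_neg hrr]
    rw [show pvRep ['r','r'] ['0'] ('c' :: 'h' :: t) = 'c' :: 'h' :: pvRep ['r','r'] ['0'] t by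
      rw [pvRep]; simp [List.isPrefixOf]; rw [pvRep]; simp [List.isPrefixOf]]
    rw [show ∀ X, pvRep ['c','h'] ['1'] ('c' :: 'h' :: X) = '1' :: pvRep ['c','h'] ['1'] X by
      intro X; rw [pvRep]; simp [List.isPrefixOf]]
    rw [show ∀ X, pvRep ['l','l'] ['2'] ('1' :: X) = '1' :: pvRep ['l','l'] ['2'] X by
      intro X; rw [pvRep]; simp [List.isPrefixOf]]
    rw [ih]; simp
  | case5 a b t hrr hch hll ih =>
    obtain ⟨rfl, rfl⟩ := hll
    rw [pvAltFwd]
    simp only [if_neg hrr, if_neg hch]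
    rw [show pvRep ['r','r'] ['0'] ('l' :: 'l' :: t) = 'l' :: 'l' :: pvRep ['r','r'] ['0'] t by
      rw [pvRep]; simp [List.isPrefixOf]; rw [pvRep]; simp [List.isPrefixOf]]
    rw [show ∀ X, pvRep ['c','h'] ['1'] ('l' :: 'l' :: X) = 'l' :: 'l' :: pvRep ['c','h'] ['1'] X by
      intro X; rw [pvRep]; simp [List.isPrefixOf]; rw [pvRep]; simp [List.isPrefixOf]]
    rw [show ∀ X, pvRep ['l','l'] ['2'] ('l' :: 'l' :: X) = '2' :: pvRep ['l','l'] ['2'] X by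
      intro X; rw [pvRep]; simp [List.isPrefixOf]]
    rw [ih]; simp
  | case6 a b t hrr hch hll ih =>
    rw [pvAltFwd]
    simp only [if_neg hrr, if_neg hch, if_neg hll]
    -- rr pass copies a
    have h1 : pvRep ['r','r'] ['0'] (a :: b :: t) = a :: pvRep ['r','r'] ['0'] (b :: t) := by
      rw [pvRep]
      have : ¬ (['r','r'] : List Char).isPrefixOf (a :: b :: t) := by
        simp [List.isPrefixOf]; intro ha hb; exact hrr ⟨ha.symm, hb.symm⟩
      simp [this]
    rw [h1]
    obtain ⟨d, u, hdu, hd⟩ := pvRep_rr_cons b t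
    -- ch pass copies a
    have h2 : pvRep ['c','h'] ['1'] (a :: pvRep ['r','r'] ['0'] (b :: t))
        = a :: pvRep ['c','h'] ['1'] (pvRep ['r','r'] ['0'] (b :: t)) := by
      rw [hdu, pvRep]
      have : ¬ (['c','h'] : List Char).isPrefixOf (a :: d :: u) := by
        simp [List.isPrefixOf]; intro ha hdh
        rcases hd with h0 | hb
        · exact absurd (hdh.trans h0) (by decide)
        · exact hch ⟨ha.symm, (hdh.trans hb).symm⟩
      simp [this]
    rw [h2, hdu]
    obtain ⟨e, v, hev, he⟩ := pvRep_ch_cons d u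
    -- ll pass copies a
    have h3 : pvRep ['l','l'] ['2'] (a :: pvRep ['c','h'] ['1'] (d :: u))
        = a :: pvRep ['l','l'] ['2'] (pvRep ['c','h'] ['1'] (d :: u)) := by
      rw [hev, pvRep]
      have : ¬ (['l','l'] : List Char).isPrefixOf (a :: e :: v) := by
        simp [List.isPrefixOf]; intro ha hel
        rcases he with h1' | hdd
        · exact absurd (hel.trans h1') (by decide)
        · rcases hd with h0 | hb
          · exact absurd ((hel.trans hdd).trans h0) (by decide)
          · exact hll ⟨ha.symm, ((hel.trans hdd).trans hb).symm⟩
      simp [this]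
    rw [h3, ← hdu, ih]

theorem pvRev_eq (l : List Char) :
    pvRep ['2'] ['l', 'l'] (pvRep ['1'] ['c', 'h'] (pvRep ['0'] ['r', 'r'] l)) = pvAltRev l := by
  induction l with
  | nil => simp [pvRep, pvAltRev]
  | cons c t ih =>
    rw [pvAltRev]
    by_cases h0 : c = '0'
    · subst h0
      rw [show pvRep ['0'] ['r','r'] ('0' :: t) = 'r' :: 'r' :: pvRep ['0'] ['r','r'] t by
        rw [pvRep]; simp [List.isPrefixOf]]
      rw [show ∀ X, pvRep ['1'] ['c','h'] ('r' :: 'r' :: X) = 'r' :: 'r' :: pvRep ['1'] ['c','h'] X by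
        intro X; rw [pvRep]; simp [List.isPrefixOf]; rw [pvRep]; simp [List.isPrefixOf]]
      rw [show ∀ X, pvRep ['2'] ['l','l'] ('r' :: 'r' :: X) = 'r' :: 'r' :: pvRep ['2'] ['l','l'] X by
        intro X; rw [pvRep]; simp [List.isPrefixOf]; rw [pvRep]; simp [List.isPrefixOf]]
      rw [ih]; simp [pvAltRevMap]
    · by_cases h1 : c = '1'
      · subst h1
        rw [show pvRep ['0'] ['r','r'] ('1' :: t) = '1' :: pvRep ['0'] ['r','r'] t by
          rw [pvRep]; simp [List.isPrefixOf]]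
        rw [show ∀ X, pvRep ['1'] ['c','h'] ('1' :: X) = 'c' :: 'h' :: pvRep ['1'] ['c','h'] X by
          intro X; rw [pvRep]; simp [List.isPrefixOf]]
        rw [show ∀ X, pvRep ['2'] ['l','l'] ('c' :: 'h' :: X) = 'c' :: 'h' :: pvRep ['2'] ['l','l'] X by
          intro X; rw [pvRep]; simp [List.isPrefixOf]; rw [pvRep]; simp [List.isPrefixOf]]
        rw [ih]; simp [pvAltRevMap]
      · by_cases h2 : c = '2'
        · subst h2
          rw [show pvRep ['0'] ['r','r'] ('2' :: t) = '2' :: pvRep ['0'] ['r','r'] t by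
            rw [pvRep]; simp [List.isPrefixOf]]
          rw [show ∀ X, pvRep ['1'] ['c','h'] ('2' :: X) = '2' :: pvRep ['1'] ['c','h'] X by
            intro X; rw [pvRep]; simp [List.isPrefixOf]]
          rw [show ∀ X, pvRep ['2'] ['l','l'] ('2' :: X) = 'l' :: 'l' :: pvRep ['2'] ['l','l'] X by
            intro X; rw [pvRep]; simp [List.isPrefixOf]]
          rw [ih]; simp [pvAltRevMap]
        · rw [show pvRep ['0'] ['r','r'] (c :: t) = c :: pvRep ['0'] ['r','r'] t by
            rw [pvRep]; simp [List.isPrefixOf, Ne.symm h0]]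
          rw [show ∀ X, pvRep ['1'] ['c','h'] (c :: X) = c :: pvRep ['1'] ['c','h'] X by
            intro X; rw [pvRep]; simp [List.isPrefixOf, Ne.symm h1]]
          rw [show ∀ X, pvRep ['2'] ['l','l'] (c :: X) = c :: pvRep ['2'] ['l','l'] X by
            intro X; rw [pvRep]; simp [List.isPrefixOf, Ne.symm h2]]
          rw [ih]; simp [pvAltRevMap, h0, h1, h2]

-- ===== VERDICT (by name: the statement is the Claim_ definition above) =====
theorem replaceSpecial_spec : Claim_equal_replaceSpecial := by
  intro word reverse _
  show replaceSpecial word reverse = replaceSpecial_alt word reverse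
  apply String.toList_inj.mp
  cases reverse with
  | false =>
    simp only [replaceSpecial, replaceSpecial_alt, List.foldl, if_false, Bool.false_eq_true,
      String.toList_ofList]
    rw [pvStep _ "ll" "2" (by decide), pvStep _ "ch" "1" (by decide),
      pvStep _ "rr" "0" (by decide)]
    rw [show ("ll" : String).toList = ['l', 'l'] from rfl, show ("2" : String).toList = ['2'] from rfl,
      show ("ch" : String).toList = ['c', 'h'] from rfl, show ("1" : String).toList = ['1'] from rfl,
      show ("rr" : String).toList = ['r', 'r'] from rfl, show ("0" : String).toList = ['0'] from rfl]
    exact pvFwd_eq word.toList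
  | true =>
    simp only [replaceSpecial, replaceSpecial_alt, List.foldl, if_true, String.toList_ofList]
    rw [pvStep _ "2" "ll" (by decide), pvStep _ "1" "ch" (by decide),
      pvStep _ "0" "rr" (by decide)]
    rw [show ("ll" : String).toList = ['l', 'l'] from rfl, show ("2" : String).toList = ['2'] from rfl,
      show ("ch" : String).toList = ['c', 'h'] from rfl, show ("1" : String).toList = ['1'] from rfl,
      show ("rr" : String).toList = ['r', 'r'] from rfl, show ("0" : String).toList = ['0'] from rfl]
    exact pvRev_eq word.toList
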